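-- pv_equiv track=rewrite | github.com/wubek/ProjectEuler | euler/euler050.py | check_length_of_sum_list_of_prime
-- ===== SOURCE A (Python) =====
-- def check_length_of_sum_list_of_prime(prime, consecutive_sums_dict, biggest = False):
--     '''
--     Having prime: 23
--     And consecutive_sums_dict: {2: 1, 5: 2, 10: 3, 17: 4, 28: 5}
--     Will find: 28 -> 5 and 5 -> 2; return 5 - 2 = 3
--     Biggest should be True if prime is at least as big as sum_limit in make_consecutive_sums_dict
--     '''
--     if prime in consecutive_sums_dict:
--         return consecutive_sums_dict[prime]
--     elif not biggest:
--         actual_val = prime + 1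
--         while actual_val not in consecutive_sums_dict:
--             actual_val += 1
--         if actual_val - prime in consecutive_sums_dict:
--             return consecutive_sums_dict[actual_val] - consecutive_sums_dict[actual_val - prime]
--     return 0
-- ===== SOURCE B (Python) =====
-- def check_length_of_sum_list_of_prime(prime, consecutive_sums_dict, biggest=False):
--     v = consecutive_sums_dict.get(prime)
--     if v is not None:
--         return v
--     if biggest:
--         return 0
--     bigger = [k for k in consecutive_sums_dict if k > prime]
--     if not bigger:
--         return 0
--     actual_val = min(bigger)
--     w = consecutive_sums_dict.get(actual_val - prime)
--     if w is None:
--         return 0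
--     return consecutive_sums_dict[actual_val] - w
-- ===== Notes on version B (the rewrite author's own statement) =====
-- stated objective: alternative
-- what changed: A hunts for the next dict key above prime by incrementing an integer one step at a time until it hits a key; B instead takes the minimum of the dict keys greater than prime in a single pass over the keys, so its cost depends only on the dict size, not on the numeric gap between prime and the next key.
import Mathlib
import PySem

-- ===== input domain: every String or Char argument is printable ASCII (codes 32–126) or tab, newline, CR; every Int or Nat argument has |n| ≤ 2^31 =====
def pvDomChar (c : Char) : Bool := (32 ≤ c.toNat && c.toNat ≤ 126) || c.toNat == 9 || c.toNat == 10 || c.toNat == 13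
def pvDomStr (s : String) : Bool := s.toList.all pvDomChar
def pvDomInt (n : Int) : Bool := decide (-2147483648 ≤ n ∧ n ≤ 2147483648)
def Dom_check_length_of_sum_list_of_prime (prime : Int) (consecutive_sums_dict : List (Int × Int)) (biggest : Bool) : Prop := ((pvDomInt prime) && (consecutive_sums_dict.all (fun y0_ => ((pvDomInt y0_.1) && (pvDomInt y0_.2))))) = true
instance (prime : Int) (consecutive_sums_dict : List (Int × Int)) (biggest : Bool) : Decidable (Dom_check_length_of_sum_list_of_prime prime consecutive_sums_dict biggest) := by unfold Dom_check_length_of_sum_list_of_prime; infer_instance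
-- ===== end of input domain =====

-- B replaces A's one-by-one upward integer scan for the next dict key above `prime` by a single
-- pass over the dict's keys (min of the keys greater than `prime`); return values are identical on Pre_.

-- ===== PORT A =====
-- A's `while actual_val not in consecutive_sums_dict: actual_val += 1`, with fuel as a pure
-- totality guard (under Pre_ a key above `prime` exists and the fuel suffices to reach it).
def pvFindUpA (d : PySem.Dict Int Int) : Int → Nat → Option Int
  | _, 0 => none
  | v, f + 1 => if d.contains v then some v else pvFindUpA d (v + 1) f

def check_length_of_sum_list_of_prime (prime : Int) (consecutive_sums_dict : List (Int × Int)) (biggest : Bool) : Int :=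
  let d := PySem.Dict.ofList consecutive_sums_dict
  if d.contains prime then d.getD prime 0
  else if !biggest then
    match pvFindUpA d (prime + 1) ((d.keys.foldl max prime - prime).toNat) with
    | some actual_val =>
      if d.contains (actual_val - prime) then
        d.getD actual_val 0 - d.getD (actual_val - prime) 0
      else 0
    | none => 0
  else 0

-- ===== PORT B =====
def check_length_of_sum_list_of_prime_alt (prime : Int) (consecutive_sums_dict : List (Int × Int)) (biggest : Bool) : Int :=
  let d := PySem.Dict.ofList consecutive_sums_dict
  match d.get? prime with
  | some v => v
  | none =>
    if biggest then 0
    else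
      let bigger := d.keys.filter (fun k => decide (prime < k))
      match PySem.List.min? bigger (fun x => x) with
      | none => 0
      | some actual_val =>
        match d.get? (actual_val - prime) with
        | none => 0
        | some w => d.getD actual_val 0 - w

-- ===== PRECONDITION & SPEC =====
-- Pre_ excludes exactly the inputs where A's while loop never finds a key and DIVERGES:
-- prime not a key, biggest false, and no key greater than prime.
def Pre_check_length_of_sum_list_of_prime (prime : Int) (consecutive_sums_dict : List (Int × Int)) (biggest : Bool) : Prop :=
  (PySem.Dict.ofList consecutive_sums_dict).contains prime = true ∨ biggest = true ∨
    ∃ k ∈ (PySem.Dict.ofList consecutive_sums_dict).keys, prime < k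
instance (prime : Int) (consecutive_sums_dict : List (Int × Int)) (biggest : Bool) : Decidable (Pre_check_length_of_sum_list_of_prime prime consecutive_sums_dict biggest) := by unfold Pre_check_length_of_sum_list_of_prime; infer_instance

def pvWitness_check_length_of_sum_list_of_prime : Int × (List (Int × Int)) × Bool :=
  (23, [(2, 1), (5, 2), (10, 3), (17, 4), (28, 5)], false)

def Spec_check_length_of_sum_list_of_prime (prime : Int) (consecutive_sums_dict : List (Int × Int)) (biggest : Bool) (out : Int) : Prop := out = check_length_of_sum_list_of_prime_alt prime consecutive_sums_dict biggest
instance (prime : Int) (consecutive_sums_dict : List (Int × Int)) (biggest : Bool) (out : Int) : Decidable (Spec_check_length_of_sum_list_of_prime prime consecutive_sums_dict biggest out) := by unfold Spec_check_length_of_sum_list_of_prime; infer_instance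

-- ===== CLAIM (what is proved, stated in full; the proofs are below) =====
def Claim_equal_check_length_of_sum_list_of_prime : Prop := ∀ (prime : Int) (consecutive_sums_dict : List (Int × Int)) (biggest : Bool), Dom_check_length_of_sum_list_of_prime prime consecutive_sums_dict biggest → Pre_check_length_of_sum_list_of_prime prime consecutive_sums_dict biggest → Spec_check_length_of_sum_list_of_prime prime consecutive_sums_dict biggest (check_length_of_sum_list_of_prime prime consecutive_sums_dict biggest)

-- ===== LEMMAS AND PROOFS =====

-- A's upward scan, started at v with enough fuel, returns the least key ≥ v.
lemma pvFindUpA_eq_some (d : PySem.Dict Int Int) (m : Int) (hm : d.contains m = true) :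
    ∀ (f : Nat) (v : Int), v ≤ m → (∀ u, v ≤ u → u < m → d.contains u = false) →
      m < v + (f : Int) → pvFindUpA d v f = some m := by
  intro f
  induction f with
  | zero => intro v _ _ hf; omega
  | succ f ih =>
    intro v hvm hmin hf
    by_cases hv : d.contains v = true
    · have : v = m := by
        by_contra hne
        have hvlt : v < m := lt_of_le_of_ne hvm hne
        have := hmin v le_rfl hvlt
        simp [this] at hv
      subst this
      simp [pvFindUpA, hv]
    · have hv' : d.contains v = false := by simpa using hv
      have hne : v ≠ m := by intro h; rw [h] at hv'; simp [hm] at hv'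
      have hvm' : v + 1 ≤ m := by omega
      have hmin' : ∀ u, v + 1 ≤ u → u < m → d.contains u = false := by
        intro u h1 h2; exact hmin u (by omega) h2
      have hf' : m < (v + 1) + (f : Int) := by push_cast at hf ⊢; omega
      simp [pvFindUpA, hv', ih (v + 1) hvm' hmin' hf']

theorem check_length_of_sum_list_of_prime_spec : Claim_equal_check_length_of_sum_list_of_prime := by
  intro prime csd biggest _ hpre
  unfold Spec_check_length_of_sum_list_of_prime
  unfold check_length_of_sum_list_of_prime check_length_of_sum_list_of_prime_alt
  set d := PySem.Dict.ofList csd with hd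
  by_cases hc : d.contains prime = true
  · -- prime is a key: both return its value
    have hs : (d.get? prime).isSome := by rw [← PySem.Dict.contains_eq_isSome_get?]; exact hc
    obtain ⟨v, hv⟩ := Option.isSome_iff_exists.mp hs
    simp [hc, hv, PySem.Dict.getD_eq_get?_getD]
  · have hc' : d.contains prime = false := by simpa using hc
    have hg : d.get? prime = none := by
      have := PySem.Dict.contains_eq_isSome_get? d prime
      rw [hc'] at this
      exact Option.not_isSome_iff_eq_none.mp (by simp [← this])
    cases biggest with
    | true => simp [hc', hg]
    | false =>
      -- Pre_ gives a key above prime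
      have hex : ∃ k ∈ d.keys, prime < k := by
        rcases hpre with h | h | h
        · rw [← hd] at h; simp [h] at hc'
        · simp at h
        · rw [← hd] at h; exact h
      obtain ⟨k₀, hk₀, hk₀gt⟩ := hex
      set bigger := d.keys.filter (fun k => decide (prime < k)) with hbig
      have hk₀big : k₀ ∈ bigger := by
        rw [hbig]; exact List.mem_filter.mpr ⟨hk₀, by simpa using hk₀gt⟩
      have hne : bigger ≠ [] := List.ne_nil_of_mem hk₀big
      obtain ⟨m, hmin?⟩ : ∃ m, PySem.List.min? bigger (fun x => x) = some m := by
        cases hmm : PySem.List.min? bigger (fun x => x) with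
        | none => exact absurd ((PySem.List.min?_eq_none_iff _ _).mp hmm) hne
        | some m => exact ⟨m, rfl⟩
      have hmmem : m ∈ bigger := PySem.List.min?_mem hmin?
      have hmkeys : m ∈ d.keys := (List.mem_filter.mp hmmem).1
      have hmgt : prime < m := by
        have := (List.mem_filter.mp hmmem).2; simpa using this
      have hmle : ∀ y ∈ bigger, m ≤ y := by
        intro y hy; exact PySem.List.min?_isMin hmin? y hy
      have hmcon : d.contains m = true := (PySem.Dict.contains_iff_mem_keys d m).mpr hmkeys
      -- A's scan finds exactly m
      have hminu : ∀ u, prime + 1 ≤ u → u < m → d.contains u = false := by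
        intro u h1 h2
        by_contra hcu
        have hcu' : d.contains u = true := by simpa using hcu
        have hukeys : u ∈ d.keys := (PySem.Dict.contains_iff_mem_keys d u).mp hcu'
        have hubig : u ∈ bigger := by
          rw [hbig]; exact List.mem_filter.mpr ⟨hukeys, by simp; omega⟩
        have := hmle u hubig; omega
      have hMbound : m ≤ d.keys.foldl max prime :=
        (PySem.List.le_foldl_max d.keys prime).2 m hmkeys
      have hfuel : m < (prime + 1) + (((d.keys.foldl max prime - prime).toNat : Nat) : Int) := by
        have h0 : (0 : Int) ≤ d.keys.foldl max prime - prime := by omega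
        rw [Int.toNat_of_nonneg h0]; omega
      have hfind : pvFindUpA d (prime + 1) ((d.keys.foldl max prime - prime).toNat) = some m :=
        pvFindUpA_eq_some d m hmcon _ (prime + 1) (by omega) hminu hfuel
      -- both sides now compute from the same m
      simp only [hc', hg, hfind, Bool.not_false, if_true]
      rw [← hbig, hmin?]
      cases hw : d.get? (m - prime) with
      | none =>
        have : d.contains (m - prime) = false := by
          rw [PySem.Dict.contains_eq_isSome_get?, hw]; rfl
        simp [this, hw]
      | some w =>
        have : d.contains (m - prime) = true := by
          rw [PySem.Dict.contains_eq_isSome_get?, hw]; rfl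
        simp [this, PySem.Dict.getD_eq_get?_getD, hw]
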